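-- pv_equiv track=rewrite | github.com/moonbeam-foundation/moonbeam-docs | scripts/translation-workflow/validate_translations.py | _frontmatter_keys
-- ===== SOURCE A (Python) =====
-- FRONTMATTER_BOUNDARY = "---"
--
-- def _frontmatter_keys(lines: list[str]) -> list[str]:
--     if not lines or lines[0].strip() != FRONTMATTER_BOUNDARY:
--         return []
--     keys = []
--     for line in lines[1:]:
--         stripped = line.strip()
--         if stripped == FRONTMATTER_BOUNDARY:
--             break
--         if ":" in stripped:
--             keys.append(stripped.split(":", 1)[0].strip())
--     return keys
-- ===== SOURCE B (Python) =====
-- FRONTMATTER_BOUNDARY = "---"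
--
-- def _frontmatter_keys(lines: list[str]) -> list[str]:
--     return _scan(lines, "start", [])
--
-- def _scan(rest, state, acc):
--     # three-state automaton: "start" (expecting the opening boundary),
--     # "body" (inside the frontmatter), "done" (finished)
--     if state == "done" or not rest:
--         return acc
--     stripped = rest[0].strip()
--     if state == "start":
--         next_state = "body" if stripped == FRONTMATTER_BOUNDARY else "done"
--     else:  # "body"
--         if stripped == FRONTMATTER_BOUNDARY:
--             next_state = "done"
--         else:
--             next_state = "body"
--             if ":" in stripped:
--                 acc = acc + [stripped.split(":", 1)[0].strip()]
--     return _scan(rest[1:], next_state, acc)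
-- ===== Notes on version B (the rewrite author's own statement) =====
-- stated objective: alternative
-- what changed: B replaces A's guard + slice + for-loop-with-break by a tail-recursive three-state automaton (start/body/done) over the whole list with an explicit key accumulator; no early return, no break, no lines[1:] slice.
import Mathlib
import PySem

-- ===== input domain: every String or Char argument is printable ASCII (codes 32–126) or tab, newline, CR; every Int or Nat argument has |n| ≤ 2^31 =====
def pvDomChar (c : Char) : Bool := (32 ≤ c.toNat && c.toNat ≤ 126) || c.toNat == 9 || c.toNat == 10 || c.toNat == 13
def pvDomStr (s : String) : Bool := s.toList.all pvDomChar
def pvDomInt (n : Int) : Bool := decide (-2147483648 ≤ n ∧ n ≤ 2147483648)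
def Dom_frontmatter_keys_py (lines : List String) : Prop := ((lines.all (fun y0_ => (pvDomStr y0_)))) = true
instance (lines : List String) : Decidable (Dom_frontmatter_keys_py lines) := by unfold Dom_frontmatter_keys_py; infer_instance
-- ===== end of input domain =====

-- B replaces A's guard + slice + loop-with-break by a tail-recursive three-state
-- automaton over the whole list with an explicit accumulator; same cost, different structure.

-- shared per-line extraction both Pythons write verbatim: stripped.split(":", 1)[0].strip()
def pvKeyOf (s : String) : String :=
  PySem.Str.strip (((PySem.Str.splitMax? s ":" 1).getD []).headD "")

-- ===== PORT A =====
-- the 'for line in lines[1:]' loop with its break, carried as structural recursion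
def pvGoA : List String → List String
  | [] => []
  | line :: rest =>
    let stripped := PySem.Str.strip line
    if stripped = "---" then []
    else if PySem.Str.isIn ":" stripped then pvKeyOf stripped :: pvGoA rest
    else pvGoA rest

def frontmatter_keys_py (lines : List String) : List String :=
  match lines with
  | [] => []
  | l0 :: rest =>
    if PySem.Str.strip l0 ≠ "---" then []
    else pvGoA rest

-- ===== PORT B =====
inductive PvState | start | body | done
deriving DecidableEq, Repr

-- _scan(rest, state, acc): the automaton's tail recursion, step for step
def pvScan : List String → PvState → List String → List String
  | _, .done, acc => acc
  | [], _, acc => acc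
  | line :: rest, .start, acc =>
    let stripped := PySem.Str.strip line
    let nextState := if stripped = "---" then PvState.body else PvState.done
    pvScan rest nextState acc
  | line :: rest, .body, acc =>
    let stripped := PySem.Str.strip line
    if stripped = "---" then pvScan rest .done acc
    else if PySem.Str.isIn ":" stripped then pvScan rest .body (acc ++ [pvKeyOf stripped])
    else pvScan rest .body acc

def frontmatter_keys_py_alt (lines : List String) : List String :=
  pvScan lines .start []

-- ===== PRECONDITION & SPEC =====
def Spec_frontmatter_keys_py (lines : List String) (out : List String) : Prop := out = frontmatter_keys_py_alt lines
instance (lines : List String) (out : List String) : Decidable (Spec_frontmatter_keys_py lines out) := by unfold Spec_frontmatter_keys_py; infer_instance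

-- ===== CLAIM (what is proved, stated in full; the proofs are below) =====
def Claim_equal_frontmatter_keys_py : Prop := ∀ (lines : List String), Dom_frontmatter_keys_py lines → Spec_frontmatter_keys_py lines (frontmatter_keys_py lines)

-- ===== LEMMAS AND PROOFS =====
lemma pvScan_done (rest : List String) (acc : List String) :
    pvScan rest .done acc = acc := by cases rest <;> rfl

lemma pvScan_body (rest : List String) (acc : List String) :
    pvScan rest .body acc = acc ++ pvGoA rest := by
  induction rest generalizing acc with
  | nil => simp [pvScan, pvGoA]
  | cons line rest ih =>
    by_cases h : PySem.Str.strip line = "---"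
    · simp [pvScan, pvGoA, h, pvScan_done]
    · simp only [pvScan, pvGoA, if_neg h, ih]
      split_ifs <;> simp

-- ===== VERDICT (by name: the statement is the Claim_ definition above) =====
theorem frontmatter_keys_py_spec : Claim_equal_frontmatter_keys_py := by
  intro lines _
  unfold Spec_frontmatter_keys_py frontmatter_keys_py frontmatter_keys_py_alt
  cases lines with
  | nil => rfl
  | cons l0 rest =>
    by_cases h : PySem.Str.strip l0 = "---" <;>
      simp [pvScan, h, pvScan_done, pvScan_body]
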